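-- pv_equiv track=rewrite | github.com/leonnidaas/STELARIS | APPS/VISUALISATION/streamlit/pages/pipeline_labelisation.py | _logs_indicate_failure
-- ===== SOURCE A (Python) =====
-- def _logs_indicate_failure(logs: str) -> bool:
-- 	if not logs:
-- 		return False
-- 	lower_logs = logs.lower()
--
-- 	# Erreurs certaines
-- 	hard_markers = [
-- 		"traceback (most recent call last):",
-- 		"le pipeline a rencontre des erreurs.",
-- 		"le pipeline a rencontré des erreurs.",
-- 		"pipeline a rencontre des erreurs",
-- 		"pipeline a rencontré des erreurs",
-- 	]
-- 	if any(marker in lower_logs for marker in hard_markers):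
-- 		return True
--
-- 	# Lignes d'erreur explicites sans penaliser les formulations de type "aucune erreur"
-- 	for line in lower_logs.splitlines():
-- 		s = line.strip()
-- 		if s.startswith("erreur :") or s.startswith("erreur lors de") or s.startswith("fichier manquant"):
-- 			return True
--
-- 	return False
-- ===== SOURCE B (Python) =====
-- _HARD_MARKERS = [
--     "traceback (most recent call last):",
--     "le pipeline a rencontre des erreurs.",
--     "le pipeline a rencontré des erreurs.",
--     "pipeline a rencontre des erreurs",
--     "pipeline a rencontré des erreurs",
-- ]
--
-- _PREFIXES = ("erreur :", "erreur lors de", "fichier manquant")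
--
--
-- def _logs_indicate_failure(logs: str) -> bool:
--     # Single pass: each hard marker contains no line break, so it occurs in the
--     # whole (lowercased) text iff it occurs in one of its lines.
--     for line in logs.lower().splitlines():
--         if any(marker in line for marker in _HARD_MARKERS):
--             return True
--         if line.strip().startswith(_PREFIXES):
--             return True
--     return False
-- ===== Notes on version B (the rewrite author's own statement) =====
-- stated objective: simpler
-- what changed: Replaces A's two separate scans (whole-string containment of hard markers, then a second loop over lines for error prefixes) with one fused loop over the lowercased lines, checking hard markers per line (valid since no marker spans a line break) and using a single tuple-startswith for the prefixes.
import Mathlib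
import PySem

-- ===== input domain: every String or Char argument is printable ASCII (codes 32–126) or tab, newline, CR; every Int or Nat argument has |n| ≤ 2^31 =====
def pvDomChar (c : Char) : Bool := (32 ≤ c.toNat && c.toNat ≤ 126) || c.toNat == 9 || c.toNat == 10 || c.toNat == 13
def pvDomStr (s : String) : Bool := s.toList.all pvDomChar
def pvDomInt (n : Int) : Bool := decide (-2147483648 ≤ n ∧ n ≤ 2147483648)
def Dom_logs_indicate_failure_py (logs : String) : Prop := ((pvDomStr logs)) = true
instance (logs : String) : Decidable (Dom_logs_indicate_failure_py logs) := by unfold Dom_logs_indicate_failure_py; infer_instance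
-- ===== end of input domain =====

-- B fuses A's two scans (whole-string hard-marker containment, then a second loop over
-- lines for error prefixes) into a single loop over the lowercased lines; same result.

-- ===== PORT A =====
def logs_indicate_failure_py (logs : String) : Bool :=
  if logs == "" then false
  else
    let lowerLogs := PySem.Str.lower logs
    let hardMarkers : List String :=
      [ "traceback (most recent call last):",
        "le pipeline a rencontre des erreurs.",
        "le pipeline a rencontré des erreurs.",
        "pipeline a rencontre des erreurs",
        "pipeline a rencontré des erreurs" ]
    if hardMarkers.any (fun marker => PySem.Str.isIn marker lowerLogs) then true
    else
      (PySem.Str.splitlines lowerLogs).any (fun line =>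
        let s := PySem.Str.strip line
        PySem.Str.startswith s "erreur :" || PySem.Str.startswith s "erreur lors de" ||
          PySem.Str.startswith s "fichier manquant")

-- ===== PORT B =====
def pvHardMarkers : List String :=
  [ "traceback (most recent call last):",
    "le pipeline a rencontre des erreurs.",
    "le pipeline a rencontré des erreurs.",
    "pipeline a rencontre des erreurs",
    "pipeline a rencontré des erreurs" ]

def pvPrefixes : List String := ["erreur :", "erreur lors de", "fichier manquant"]

def logs_indicate_failure_py_alt (logs : String) : Bool :=
  (PySem.Str.splitlines (PySem.Str.lower logs)).any (fun line =>
    pvHardMarkers.any (fun marker => PySem.Str.isIn marker line) ||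
      pvPrefixes.any (fun p => PySem.Str.startswith (PySem.Str.strip line) p))

-- ===== PRECONDITION & SPEC =====
def Spec_logs_indicate_failure_py (logs : String) (out : Bool) : Prop := out = logs_indicate_failure_py_alt logs
instance (logs : String) (out : Bool) : Decidable (Spec_logs_indicate_failure_py logs out) := by unfold Spec_logs_indicate_failure_py; infer_instance

-- ===== CLAIM (what is proved, stated in full; the proofs are below) =====
def Claim_equal_logs_indicate_failure_py : Prop := ∀ (logs : String), Dom_logs_indicate_failure_py logs → Spec_logs_indicate_failure_py logs (logs_indicate_failure_py logs)

-- ===== LEMMAS AND PROOFS =====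

-- A prefix cannot reach past an element it does not contain.
theorem pv_prefix_append_break {α : Type} [DecidableEq α] {sub a c : List α} {b : α}
    (hb : b ∉ sub) : sub <+: a ++ b :: c ↔ sub <+: a := by
  constructor
  · intro h
    have h2 : sub = (a ++ b :: c).take sub.length := List.prefix_iff_eq_take.mp h
    by_cases hlen : sub.length ≤ a.length
    · have h3 : sub = a.take sub.length := by
        rw [List.take_append_of_le_length hlen] at h2
        exact h2
      exact h3 ▸ List.take_prefix _ a
    · exfalso
      have hlt : a.length < ((a ++ b :: c).take sub.length).length := by
        simp [List.length_take, List.length_append]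
        omega
      have hval : ((a ++ b :: c).take sub.length)[a.length]'hlt = b := by simp
      have hbmem := List.getElem_mem hlt
      rw [hval] at hbmem
      exact hb (h2 ▸ hbmem)
  · intro h
    exact h.trans (List.prefix_append _ _)

-- An occurrence of a pattern not containing b lies entirely on one side of b.
theorem pv_infix_append_break {α : Type} [DecidableEq α] {sub : List α} {b : α}
    (hb : b ∉ sub) : ∀ (a c : List α), (sub <:+: a ++ b :: c ↔ sub <:+: a ∨ sub <:+: c)
  | [], c => by
    rw [List.nil_append, List.infix_cons_iff, List.infix_nil]
    constructor
    · rintro (h | h)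
      · left
        rcases sub with _ | ⟨x, xs⟩
        · rfl
        · obtain ⟨t, ht⟩ := h
          rw [List.cons_append] at ht
          exact absurd ((List.cons.injEq ..).mp ht).1.symm
            (fun hx => hb (hx ▸ List.mem_cons_self))
      · exact Or.inr h
    · rintro (h | h)
      · subst h; exact Or.inl List.nil_prefix
      · exact Or.inr h
  | x :: a, c => by
    rw [List.cons_append, List.infix_cons_iff, List.infix_cons_iff]
    have h1 : sub <+: x :: (a ++ b :: c) ↔ sub <+: x :: a := by
      simpa using pv_prefix_append_break (a := x :: a) (c := c) hb
    rw [h1, pv_infix_append_break hb a c]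
    tauto

-- Invariant of the splitlines accumulator loop for a nonempty break-free pattern.
theorem pv_go_any (isB : Char → Bool) (sub : List Char) (hne : sub ≠ [])
    (hB : ∀ c ∈ sub, isB c = false) (hr : '\x0d' ∉ sub) (hn : '\n' ∉ sub) :
    ∀ (s cur : List Char) (acc : List (List Char)),
      ((PySem.Chars.splitlines.go isB s cur acc).any (fun l => PySem.Chars.isIn sub l) = true) ↔
        ((acc.any (fun l => PySem.Chars.isIn sub l) = true) ∨ sub <:+: (cur.reverse ++ s)) := by
  intro s cur acc
  induction s, cur, acc using PySem.Chars.splitlines.go.induct (isB := isB) with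
  | case1 cur acc hcur =>
    rw [List.isEmpty_iff] at hcur
    subst hcur
    rw [PySem.Chars.splitlines.go.eq_1]
    simp [List.infix_nil, hne]
  | case2 cur acc hcur =>
    rw [PySem.Chars.splitlines.go.eq_1, if_neg hcur]
    simp only [List.any_reverse, List.any_cons, Bool.or_eq_true, PySem.Chars.isIn_iff_infix,
      List.append_nil]
    tauto
  | case3 rest cur acc ih =>
    rw [PySem.Chars.splitlines.go.eq_2, ih]
    have h2 : sub <:+: '\n' :: rest ↔ sub <:+: ([] : List Char) ∨ sub <:+: rest := by
      simpa using pv_infix_append_break hn [] rest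
    rw [pv_infix_append_break hr cur.reverse ('\n' :: rest), h2]
    simp only [List.any_cons, Bool.or_eq_true, PySem.Chars.isIn_iff_infix, List.reverse_nil,
      List.nil_append, List.infix_nil, hne]
    tauto
  | case4 c rest cur acc hnotCRLF hc ih =>
    have hcm : c ∉ sub := fun hmem => by simp [hB c hmem] at hc
    rw [PySem.Chars.splitlines.go.eq_3 _ _ _ _ _ hnotCRLF, if_pos hc, ih,
      pv_infix_append_break hcm cur.reverse rest]
    simp only [List.any_cons, Bool.or_eq_true, PySem.Chars.isIn_iff_infix, List.reverse_nil,
      List.nil_append]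
    tauto
  | case5 c rest cur acc hnotCRLF hc ih =>
    rw [PySem.Chars.splitlines.go.eq_3 _ _ _ _ _ hnotCRLF, if_neg hc, ih, List.reverse_cons,
      List.append_assoc]
    rfl

-- splitlines keeps every occurrence of a nonempty break-free pattern.
theorem pv_isIn_splitlines (sub s : List Char) (hne : sub ≠ [])
    (hB : ∀ c ∈ sub,
      (decide (c.toNat = 10) || decide (c.toNat = 13) || decide (c.toNat = 11) ||
        decide (c.toNat = 12) || decide (c.toNat = 28) || decide (c.toNat = 29) ||
        decide (c.toNat = 30) || decide (c.toNat = 133) || decide (c.toNat = 8232) ||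
        decide (c.toNat = 8233)) = false) :
    PySem.Chars.isIn sub s = (PySem.Chars.splitlines s).any (fun l => PySem.Chars.isIn sub l) := by
  have hr : '\x0d' ∉ sub := fun h => by simpa using hB _ h
  have hn : '\n' ∉ sub := fun h => by simpa using hB _ h
  rw [Bool.eq_iff_iff, PySem.Chars.splitlines.eq_1]
  rw [pv_go_any _ sub hne hB hr hn s [] []]
  simp [PySem.Chars.isIn_iff_infix]

-- ===== VERDICT (by name: the statement is the Claim_ definition above) =====
theorem logs_indicate_failure_py_spec : Claim_equal_logs_indicate_failure_py := by
  intro logs _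
  unfold Spec_logs_indicate_failure_py logs_indicate_failure_py logs_indicate_failure_py_alt
  by_cases hlogs : logs = ""
  · subst hlogs
    rfl
  · dsimp only [pvHardMarkers, pvPrefixes]
    rw [if_neg (by simpa using hlogs)]
    have key : ∀ m : String, m.toList ≠ [] →
        (∀ c ∈ m.toList,
          (decide (c.toNat = 10) || decide (c.toNat = 13) || decide (c.toNat = 11) ||
            decide (c.toNat = 12) || decide (c.toNat = 28) || decide (c.toNat = 29) ||
            decide (c.toNat = 30) || decide (c.toNat = 133) || decide (c.toNat = 8232) ||
            decide (c.toNat = 8233)) = false) →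
        PySem.Str.isIn m (PySem.Str.lower logs) =
          (PySem.Str.splitlines (PySem.Str.lower logs)).any
            (fun l => PySem.Str.isIn m l) := by
      intro m hne hB
      have h1 := pv_isIn_splitlines m.toList (PySem.Str.lower logs).toList hne hB
      have h2 : (PySem.Str.splitlines (PySem.Str.lower logs)).map String.toList =
          PySem.Chars.splitlines (PySem.Str.lower logs).toList :=
        PySem.Str.splitlines_map_toList _
      calc PySem.Str.isIn m (PySem.Str.lower logs)
          = PySem.Chars.isIn m.toList (PySem.Str.lower logs).toList := by simp
        _ = (PySem.Chars.splitlines (PySem.Str.lower logs).toList).any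
              (fun l => PySem.Chars.isIn m.toList l) := h1
        _ = ((PySem.Str.splitlines (PySem.Str.lower logs)).map String.toList).any
              (fun l => PySem.Chars.isIn m.toList l) := by rw [h2]
        _ = (PySem.Str.splitlines (PySem.Str.lower logs)).any
              (fun l => PySem.Str.isIn m l) := by
            rw [List.any_map]
            simp [Function.comp_def]
    have hcond : ∀ m ∈ ([ "traceback (most recent call last):",
        "le pipeline a rencontre des erreurs.",
        "le pipeline a rencontré des erreurs.",
        "pipeline a rencontre des erreurs",
        "pipeline a rencontré des erreurs" ] : List String), m.toList ≠ [] ∧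
        (∀ c ∈ m.toList,
          (decide (c.toNat = 10) || decide (c.toNat = 13) || decide (c.toNat = 11) ||
            decide (c.toNat = 12) || decide (c.toNat = 28) || decide (c.toNat = 29) ||
            decide (c.toNat = 30) || decide (c.toNat = 133) || decide (c.toNat = 8232) ||
            decide (c.toNat = 8233)) = false) := by
      intro m hm
      simp only [List.mem_cons, List.not_mem_nil, or_false] at hm
      rcases hm with rfl | rfl | rfl | rfl | rfl <;>
        exact ⟨by simp [String.reduceToList], by simp [String.reduceToList]⟩
    by_cases h1 : ([ "traceback (most recent call last):",
        "le pipeline a rencontre des erreurs.",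
        "le pipeline a rencontré des erreurs.",
        "pipeline a rencontre des erreurs",
        "pipeline a rencontré des erreurs" ] : List String).any
          (fun marker => PySem.Str.isIn marker (PySem.Str.lower logs)) = true
    · rw [if_pos h1]
      obtain ⟨m, hm, hmt⟩ := List.any_eq_true.mp h1
      rw [key m (hcond m hm).1 (hcond m hm).2] at hmt
      obtain ⟨l, hl, hlt⟩ := List.any_eq_true.mp hmt
      symm
      rw [List.any_eq_true]
      refine ⟨l, hl, ?_⟩
      simp only [Bool.or_eq_true]
      exact Or.inl (List.any_eq_true.mpr ⟨m, hm, hlt⟩)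
    · rw [if_neg h1, Bool.eq_iff_iff, List.any_eq_true, List.any_eq_true]
      constructor
      · rintro ⟨l, hl, hpf⟩
        refine ⟨l, hl, ?_⟩
        simp only [Bool.or_eq_true]
        right
        simpa [Bool.or_assoc] using hpf
      · rintro ⟨l, hl, h⟩
        rw [Bool.or_eq_true] at h
        rcases h with hhard | hpf
        · exfalso
          obtain ⟨m, hm, hml⟩ := List.any_eq_true.mp hhard
          apply h1
          exact List.any_eq_true.mpr ⟨m, hm, by
            rw [key m (hcond m hm).1 (hcond m hm).2]
            exact List.any_eq_true.mpr ⟨l, hl, hml⟩⟩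
        · exact ⟨l, hl, by simpa [Bool.or_assoc] using hpf⟩
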